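-- pv_equiv track=rewrite | github.com/yodigi7/kattis | owlAndFox.py | get_closest_smaller_number
-- ===== SOURCE A (Python) =====
-- def get_closest_smaller_number(num: int) -> int:
--     smaller_number = []
--     str_num = str(num)
--     for i in range(len(str_num) - 1, -1, -1):
--         if not str_num[i] is "0":
--             smaller_number.insert(0, str(int(str_num[i]) - 1))
--             smaller_number = [digit for digit in str_num[:i]] + smaller_number
--             break
--         else:
--             smaller_number.insert(0, "0")
--     smaller_number = "".join(smaller_number)
--     return int(smaller_number)
-- ===== SOURCE B (Python) =====
-- def get_closest_smaller_number(num: int) -> int: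
--     # Arithmetic instead of digit-string surgery: subtract the place value of
--     # the lowest non-zero digit of |num|, keep the sign; 0 stays 0.
--     if num == 0:
--         return 0
--     m = abs(num)
--     tz = 0
--     while m % 10 == 0:
--         tz += 1
--         m //= 10
--     r = abs(num) - 10 ** tz
--     return -r if num < 0 else r
-- ===== Notes on version B (the rewrite author's own statement) =====
-- stated objective: simpler
-- what changed: Replaces the digit-string scan/splice/rejoin/reparse with pure integer arithmetic: strip trailing zeros of |num| by repeated division to find the place value 10**tz of the lowest non-zero digit, subtract it from |num| and restore the sign (0 maps to 0).
import Mathlib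
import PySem

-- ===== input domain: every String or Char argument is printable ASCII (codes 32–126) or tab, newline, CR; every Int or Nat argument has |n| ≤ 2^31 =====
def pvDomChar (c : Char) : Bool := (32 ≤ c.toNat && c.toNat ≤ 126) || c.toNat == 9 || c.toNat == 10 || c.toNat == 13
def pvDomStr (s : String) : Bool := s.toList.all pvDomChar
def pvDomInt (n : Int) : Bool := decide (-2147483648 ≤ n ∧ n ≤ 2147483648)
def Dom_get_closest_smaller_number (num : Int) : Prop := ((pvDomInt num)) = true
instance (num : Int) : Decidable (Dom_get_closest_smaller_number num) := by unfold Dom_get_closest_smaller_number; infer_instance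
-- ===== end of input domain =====

-- B replaces A's digit-string scan/splice/rejoin/reparse by integer arithmetic
-- (strip trailing zeros of |num|, subtract that place value, restore the sign): simpler, no strings.

-- ===== PORT A =====

-- int(c) for a single digit character c ('0'..'9'); exact there.
def pvDigitVal (c : Char) : Int := (c.toNat : Int) - 48

-- value of a big-endian run of digit characters (helper of the hand int() port below)
def pvValD (cs : List Char) : Int := cs.foldl (fun a c => 10 * a + pvDigitVal c) 0

-- int(s), ported BY HAND: exact for a non-empty run of ASCII digits optionally preceded
-- by '-' — the only strings this program ever builds.  (PySem.Int.ofStr? computes the same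
-- value on those strings, but its digit parser is private to the prelude, so the proof
-- below could not reason about it.)
def pvIntOfStr (s : String) : Int :=
  if s.toList.head? = some '-' then -(pvValD s.toList.tail) else pvValD s.toList

-- the `for i in range(len(str_num)-1, -1, -1)` loop with its break, index by index;
-- acc is smaller_number (a list of 1-char strings).
def pvLoopA (s : List Char) : Nat → List String → List String
  | 0, acc => acc
  | i + 1, acc =>
    let c := PySem.List.pyGetD s (i : Int) ' '          -- str_num[i]
    if c ≠ '0' then
      -- smaller_number.insert(0, str(int(str_num[i]) - 1)); prefix of str_num[:i]; break
      (PySem.List.slice s none (some (i : Int))).map (fun d => String.ofList [d]) ++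
        PySem.List.insert acc 0 (PySem.Int.toStr (pvDigitVal c - 1))
    else
      pvLoopA s i (PySem.List.insert acc 0 "0")

def get_closest_smaller_number (num : Int) : Int :=
  let strNum := PySem.Int.toChars num                   -- str(num) (kept as its character list)
  let smaller := pvLoopA strNum strNum.length []
  pvIntOfStr (PySem.Str.join "" smaller)                -- int("".join(smaller_number))

-- ===== PORT B =====

-- the `while m % 10 == 0: tz += 1; m //= 10` loop, returning tz
-- (the m ≠ 0 guard only makes the recursion total; B is only called with m ≥ 1)
def pvTrailing (m : Nat) : Nat :=
  if h : m ≠ 0 ∧ m % 10 = 0 then pvTrailing (m / 10) + 1 else 0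
termination_by m
decreasing_by exact Nat.div_lt_self (Nat.pos_of_ne_zero h.1) (by norm_num)

def get_closest_smaller_number_alt (num : Int) : Int :=
  if num = 0 then 0
  else
    let m := num.natAbs
    let tz := pvTrailing m
    let r := (m : Int) - 10 ^ tz
    if num < 0 then -r else r

-- ===== PRECONDITION & SPEC =====
def Spec_get_closest_smaller_number (num : Int) (out : Int) : Prop := out = get_closest_smaller_number_alt num
instance (num : Int) (out : Int) : Decidable (Spec_get_closest_smaller_number num out) := by unfold Spec_get_closest_smaller_number; infer_instance

-- ===== CLAIM (what is proved, stated in full; the proofs are below) =====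
def Claim_equal_get_closest_smaller_number : Prop := ∀ (num : Int), Dom_get_closest_smaller_number num → Spec_get_closest_smaller_number num (get_closest_smaller_number num)

-- ===== LEMMAS AND PROOFS =====

theorem pvToDigitsCore_eq (f : Nat) : ∀ (n : Nat) (ds : List Char), n < f →
    Nat.toDigitsCore 10 f n ds =
      (if n = 0 then ['0'] else ((Nat.digits 10 n).map Nat.digitChar).reverse) ++ ds := by
  induction f with
  | zero => intro n ds h; omega
  | succ f ih =>
    intro n ds h
    rw [Nat.toDigitsCore]
    by_cases h10 : n / 10 = 0
    · simp only [h10, if_pos rfl, reduceIte]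
      by_cases h0 : n = 0
      · subst h0; simp; decide
      · rw [if_neg h0, Nat.digits_def' (b := 10) (by norm_num) (Nat.pos_of_ne_zero h0), h10]
        simp
    · rw [if_neg h10, ih (n / 10) _ (by omega)]
      have h0 : n ≠ 0 := by intro e; subst e; simp at h10
      rw [if_neg h10, if_neg h0,
        Nat.digits_def' (b := 10) (by norm_num) (Nat.pos_of_ne_zero h0)]
      simp

theorem pvToDigits_eq (n : Nat) :
    Nat.toDigits 10 n = (if n = 0 then ['0'] else ((Nat.digits 10 n).map Nat.digitChar).reverse) := by
  rw [Nat.toDigits, pvToDigitsCore_eq (n + 1) n [] (by omega)]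
  simp

theorem pvInsert_zero {α : Type} (acc : List α) (x : α) : PySem.List.insert acc 0 x = x :: acc := by
  simp [PySem.List.insert, PySem.List.sliceIndices]



theorem pvLoopA_congr (i : Nat) : ∀ (s t : List Char) (acc : List String),
    s.take i = t.take i → pvLoopA s i acc = pvLoopA t i acc := by
  induction i with
  | zero => intro s t acc _; rfl
  | succ i ih =>
    intro s t acc h
    have hg : s.getD i ' ' = t.getD i ' ' := by
      have h' := congrArg (fun l => l[i]?) h
      simp only [List.getElem?_take, Nat.lt_succ_self, if_pos] at h'
      simp [List.getD, h']
    have ht : s.take i = t.take i := by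
      have := congrArg (List.take i) h
      simpa [List.take_take] using this
    simp only [pvLoopA, PySem.List.pyGetD_natCast, hg]
    split_ifs with hc
    · rw [PySem.List.slice_to_natCast, PySem.List.slice_to_natCast, ht]
    · exact ih _ _ _ ht

theorem pvLoopA_run (p : List Char) (c : Char) (hc : c ≠ '0') (k : Nat) (acc : List String) :
    pvLoopA (p ++ c :: List.replicate k '0') (p.length + 1 + k) acc
      = p.map (fun d => String.ofList [d]) ++
          PySem.Int.toStr (pvDigitVal c - 1) :: (List.replicate k "0" ++ acc) := by
  induction k generalizing acc with
  | zero =>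
    show pvLoopA (p ++ [c]) (p.length + 1) acc = _
    simp only [pvLoopA, PySem.List.pyGetD_natCast]
    have hg : (p ++ [c]).getD p.length ' ' = c := by
      simp [List.getD, List.getElem?_append_right]
    rw [hg, if_pos hc, PySem.List.slice_to_natCast, pvInsert_zero]
    simp
  | succ k ih =>
    have hidx : p.length + 1 + (k + 1) = (p.length + 1 + k) + 1 := by omega
    rw [hidx]
    simp only [pvLoopA, PySem.List.pyGetD_natCast]
    have hg : (p ++ c :: List.replicate (k+1) '0').getD (p.length + 1 + k) ' ' = '0' := by
      rw [List.getD, List.getElem?_append_right (by omega)]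
      have : p.length + 1 + k - p.length = k + 1 := by omega
      rw [this]
      simp [List.getElem?_cons, List.getElem?_replicate]
    rw [hg, if_neg (by simp)]
    have hcg : pvLoopA (p ++ c :: List.replicate (k+1) '0') (p.length + 1 + k)
        (PySem.List.insert acc 0 "0")
        = pvLoopA (p ++ c :: List.replicate k '0') (p.length + 1 + k)
        (PySem.List.insert acc 0 "0") := by
      apply pvLoopA_congr
      have h1 : p.length + 1 + k = p.length + (1 + k) := by omega
      rw [h1, List.take_append, List.take_append]
      rw [show 1 + k = k + 1 from by omega]
      simp [List.take_replicate]
    rw [hcg, ih, pvInsert_zero]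
    rw [List.replicate_succ' (n := k)]
    simp

theorem pvDigitChar_toNat {d : Nat} (h : d < 10) : (Nat.digitChar d).toNat = 48 + d := by
  interval_cases d <;> decide

theorem pvDigitChar_ne_dash {d : Nat} (h : d < 10) : Nat.digitChar d ≠ '-' := by
  interval_cases d <;> decide

theorem pvDigitChar_ne_zero {d : Nat} (h : d < 10) (h0 : d ≠ 0) : Nat.digitChar d ≠ '0' := by
  interval_cases d <;> simp_all <;> decide

theorem pvValD_fold (L : List Nat) (h : ∀ d ∈ L, d < 10) : ∀ (a : Int),
    List.foldl (fun x c => 10 * x + pvDigitVal c) a ((L.map Nat.digitChar).reverse)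
      = a * 10 ^ L.length + ((Nat.ofDigits 10 L : ℕ) : Int) := by
  induction L with
  | nil => intro a; simp [Nat.ofDigits_nil]
  | cons d t ih =>
    intro a
    have hd : d < 10 := h d (by simp)
    have ht : ∀ x ∈ t, x < 10 := fun x hx => h x (by simp [hx])
    simp only [List.map_cons, List.reverse_cons, List.foldl_append, ih ht a, List.foldl_cons,
      List.foldl_nil, Nat.ofDigits_cons, List.length_cons]
    unfold pvDigitVal
    rw [pvDigitChar_toNat hd]
    push_cast
    ring

theorem pvTrailing_pow_mul (k : Nat) : ∀ (q : Nat), q % 10 ≠ 0 → 0 < q →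
    pvTrailing (10 ^ k * q) = k := by
  induction k with
  | zero =>
    intro q hq hq0
    rw [pvTrailing]
    simp [hq]
  | succ k ih =>
    intro q hq hq0
    rw [pvTrailing]
    rw [dif_pos ⟨by positivity, by
      rw [pow_succ, mul_comm (10 ^ k) 10, mul_assoc]; exact Nat.mul_mod_right 10 _⟩]
    have : 10 ^ (k + 1) * q / 10 = 10 ^ k * q := by
      rw [pow_succ, mul_comm (10 ^ k) 10, mul_assoc]
      exact Nat.mul_div_cancel_left _ (by norm_num)
    rw [this, ih q hq hq0]

theorem pvDecomp (n : Nat) (hn : 0 < n) :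
    ∃ k q : Nat, n = 10 ^ k * q ∧ q % 10 ≠ 0 ∧ 0 < q := by
  induction n using Nat.strong_induction_on with
  | _ n ih =>
    by_cases h : n % 10 = 0
    · have h10 : 10 ≤ n := by omega
      obtain ⟨k, q, h1, h2, h3⟩ := ih (n / 10) (by omega) (by omega)
      refine ⟨k + 1, q, ?_, h2, h3⟩
      have hn10 : n = 10 * (n / 10) := by omega
      rw [hn10, h1, pow_succ]
      ring
    · exact ⟨0, n, by simp, h, hn⟩

theorem pvOfDigits_shape {k dq' : Nat} {rest : List Nat} :
    Nat.ofDigits 10 (List.replicate k 0 ++ dq' :: rest)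
      = 10 ^ k * (dq' + 10 * Nat.ofDigits 10 rest) := by
  rw [Nat.ofDigits_append, Nat.ofDigits_replicate_zero, Nat.ofDigits_cons]
  simp [List.length_replicate]

theorem pvMain (n : Nat) (hn : 0 < n) :
    pvIntOfStr (PySem.Str.join ""
        (pvLoopA (Nat.toDigits 10 n) (Nat.toDigits 10 n).length []))
      = (n : Int) - 10 ^ pvTrailing n ∧
    pvIntOfStr (PySem.Str.join ""
        (pvLoopA ('-' :: Nat.toDigits 10 n) ('-' :: Nat.toDigits 10 n).length []))
      = -((n : Int) - 10 ^ pvTrailing n) := by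
  obtain ⟨k, q, hnkq, hq10, hq0⟩ := pvDecomp n hn
  have htr : pvTrailing n = k := by rw [hnkq]; exact pvTrailing_pow_mul k q hq10 hq0
  obtain ⟨dq', hdq'⟩ : ∃ d', q % 10 = d' + 1 := ⟨q % 10 - 1, by omega⟩
  have hdq_lt : dq' + 1 < 10 := by
    have := Nat.mod_lt q (show 0 < 10 by norm_num); omega
  set rest := Nat.digits 10 (q / 10) with hrest
  have hdq : Nat.digits 10 q = (dq' + 1) :: rest := by
    rw [Nat.digits_def' (by norm_num : (1:Nat) < 10) hq0, hdq']
  have hdigs : Nat.digits 10 n = List.replicate k 0 ++ (dq' + 1) :: rest := by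
    rw [hnkq, Nat.digits_base_pow_mul (by norm_num) hq0, hdq]
  have hrest_lt : ∀ d ∈ rest, d < 10 := fun d hd => Nat.digits_lt_base (by norm_num) hd
  set p := (rest.map Nat.digitChar).reverse with hp
  set c := Nat.digitChar (dq' + 1) with hc
  have hcne : c ≠ '0' := pvDigitChar_ne_zero hdq_lt (by omega)
  have hs : Nat.toDigits 10 n = p ++ c :: List.replicate k '0' := by
    rw [pvToDigits_eq, if_neg (by omega), hdigs]
    simp [List.map_append, List.reverse_append, List.map_replicate,
      (by decide : Nat.digitChar 0 = '0'), List.reverse_replicate]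
    rfl
  have hval_c : pvDigitVal c - 1 = (dq' : Int) := by
    unfold pvDigitVal
    rw [hc, pvDigitChar_toNat hdq_lt]
    push_cast
    ring
  have htoStr : PySem.Int.toStr (pvDigitVal c - 1) = String.ofList [Nat.digitChar dq'] := by
    rw [hval_c]
    have h9 : dq' < 10 := by omega
    interval_cases dq' <;> rfl
  set F := p ++ Nat.digitChar dq' :: List.replicate k '0' with hF
  have hsingles : ∀ (xs : List Char),
      List.map String.toList (xs.map (fun d => String.ofList [d])
          ++ String.ofList [Nat.digitChar dq'] :: (List.replicate k "0" ++ []))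
        = (xs ++ Nat.digitChar dq' :: List.replicate k '0').map (fun ch => [ch]) := by
    intro xs
    simp [List.map_append, List.map_map, List.map_replicate, Function.comp]
  have hjoin : ∀ (xs : List Char),
      (PySem.Str.join "" (xs.map (fun d => String.ofList [d])
          ++ String.ofList [Nat.digitChar dq'] :: (List.replicate k "0" ++ []))).toList
        = xs ++ Nat.digitChar dq' :: List.replicate k '0' := by
    intro xs
    rw [PySem.Str.toList_join, hsingles]
    simpa using PySem.Chars.join_nil_singletons (xs ++ Nat.digitChar dq' :: List.replicate k '0')
  have hvalF : pvValD F = (n : Int) - 10 ^ k := by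
    have hF2 : F = ((List.replicate k 0 ++ dq' :: rest).map Nat.digitChar).reverse := by
      simp [hF, hp, List.map_append, List.reverse_append, List.map_replicate,
        (by decide : Nat.digitChar 0 = '0'), List.reverse_replicate]
    have hlt : ∀ d ∈ List.replicate k 0 ++ dq' :: rest, d < 10 := by
      intro d hd
      rcases List.mem_append.mp hd with h | h
      · have := List.eq_of_mem_replicate h; omega
      · rcases List.mem_cons.mp h with h | h
        · omega
        · exact hrest_lt _ h
    unfold pvValD
    rw [hF2, pvValD_fold _ hlt 0, pvOfDigits_shape]
    have h2 : n = 10 ^ k * (dq' + 1 + 10 * Nat.ofDigits 10 rest) := by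
      conv_lhs => rw [← Nat.ofDigits_digits 10 n]
      rw [hdigs, pvOfDigits_shape]
    have h2' : (n : Int)
        = 10 ^ k * ((dq' : Int) + 1 + 10 * (Nat.ofDigits 10 rest : Nat)) := by
      rw [h2]; push_cast; ring
    rw [h2']
    push_cast
    ring
  have hFhead : ∀ x, F.head? = some x → x ≠ '-' := by
    intro x hx
    rcases hP : p with _ | ⟨y, ys⟩
    · rw [hF, hP] at hx
      simp at hx
      rw [← hx]
      exact pvDigitChar_ne_dash (by omega)
    · rw [hF, hP] at hx
      simp at hx
      have hy : y ∈ p := by rw [hP]; exact List.mem_cons_self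
      have : y ∈ rest.map Nat.digitChar := List.mem_reverse.mp (hp ▸ hy)
      obtain ⟨d, hd, hde⟩ := List.mem_map.mp this
      rw [← hx, ← hde]
      exact pvDigitChar_ne_dash (hrest_lt d hd)
  constructor
  · -- positive sign
    have hloop : pvLoopA (Nat.toDigits 10 n) (Nat.toDigits 10 n).length []
        = p.map (fun d => String.ofList [d]) ++
            PySem.Int.toStr (pvDigitVal c - 1) :: (List.replicate k "0" ++ []) := by
      rw [hs]
      have hl : (p ++ c :: List.replicate k '0').length = p.length + 1 + k := by
        simp; omega
      rw [hl]
      exact pvLoopA_run p c hcne k []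
    rw [hloop, htoStr, htr]
    unfold pvIntOfStr
    rw [hjoin p]
    rw [if_neg (fun hcontra => hFhead '-' (by rw [hF]; exact hcontra) rfl)]
    exact hvalF
  · -- negative sign
    have hshape : '-' :: Nat.toDigits 10 n = ('-' :: p) ++ c :: List.replicate k '0' := by
      rw [hs]; rfl
    have hloop : pvLoopA ('-' :: Nat.toDigits 10 n) ('-' :: Nat.toDigits 10 n).length []
        = ('-' :: p).map (fun d => String.ofList [d]) ++
            PySem.Int.toStr (pvDigitVal c - 1) :: (List.replicate k "0" ++ []) := by
      rw [hshape]
      have hl : (('-' :: p) ++ c :: List.replicate k '0').length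
          = ('-' :: p).length + 1 + k := by
        simp; omega
      rw [hl]
      exact pvLoopA_run ('-' :: p) c hcne k []
    rw [hloop, htoStr, htr]
    unfold pvIntOfStr
    have hj := hjoin ('-' :: p)
    rw [List.cons_append] at hj
    rw [hj]
    rw [if_pos (by simp)]
    simp only [List.tail_cons]
    exact congrArg Neg.neg hvalF

-- ===== VERDICT (by name: the statement is the Claim_ definition above) =====
theorem get_closest_smaller_number_spec : Claim_equal_get_closest_smaller_number := by
  unfold Claim_equal_get_closest_smaller_number
  intro num _
  unfold Spec_get_closest_smaller_number
  unfold get_closest_smaller_number get_closest_smaller_number_alt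
  rcases lt_trichotomy num 0 with hneg | hzero | hpos
  · have hne : num ≠ 0 := by omega
    have habs : 0 < num.natAbs := by omega
    have htc : PySem.Int.toChars num = '-' :: Nat.toDigits 10 num.natAbs := by
      unfold PySem.Int.toChars
      rw [if_pos hneg]
    rw [htc, (pvMain num.natAbs habs).2, if_neg hne, if_pos hneg]
  · subst hzero
    decide
  · have hne : num ≠ 0 := by omega
    have habs : 0 < num.natAbs := by omega
    have htc : PySem.Int.toChars num = Nat.toDigits 10 num.natAbs := by
      unfold PySem.Int.toChars
      rw [if_neg (by omega)]
      congr 1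
      omega
    rw [htc, (pvMain num.natAbs habs).1, if_neg hne, if_neg (by omega)]
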